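-- pv_equiv track=rewrite | github.com/HtooSayWah/Cyberbullying-System | model.py | ExpectedTarget
-- ===== SOURCE A (Python) =====
-- def ExpectedTarget(wlist,corpus):
--     Yvalue = []
--     for c in corpus:
--         ctemp = c.split()
--         ytemp = []
--         for ct in ctemp:
--             if ct in wlist:
--                 ytemp.append(1)
--             else:
--                 ytemp.append(0)
--         if sum(ytemp)>0:
--             Yvalue.append(1)
--         else:
--             Yvalue.append(0)
--     return Yvalue
-- ===== SOURCE B (Python) =====
-- def ExpectedTarget(wlist, corpus):
--     # inverted index: token -> set of indices of documents containing it
--     index = {}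
--     for i, c in enumerate(corpus):
--         for t in c.split():
--             index.setdefault(t, set()).add(i)
--     # union of the posting lists of all target words
--     hit = set()
--     for w in wlist:
--         hit |= index.get(w, set())
--     return [1 if i in hit else 0 for i in range(len(corpus))]
-- ===== Notes on version B (the rewrite author's own statement) =====
-- stated objective: faster
-- what changed: B builds an inverted index from token to the set of document indices containing it, unions the posting sets of the target words, and emits the 0/1 flags by document index, replacing A's per-document per-token linear scan of wlist with its per-word 0/1 list summed afterwards.
import Mathlib
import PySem

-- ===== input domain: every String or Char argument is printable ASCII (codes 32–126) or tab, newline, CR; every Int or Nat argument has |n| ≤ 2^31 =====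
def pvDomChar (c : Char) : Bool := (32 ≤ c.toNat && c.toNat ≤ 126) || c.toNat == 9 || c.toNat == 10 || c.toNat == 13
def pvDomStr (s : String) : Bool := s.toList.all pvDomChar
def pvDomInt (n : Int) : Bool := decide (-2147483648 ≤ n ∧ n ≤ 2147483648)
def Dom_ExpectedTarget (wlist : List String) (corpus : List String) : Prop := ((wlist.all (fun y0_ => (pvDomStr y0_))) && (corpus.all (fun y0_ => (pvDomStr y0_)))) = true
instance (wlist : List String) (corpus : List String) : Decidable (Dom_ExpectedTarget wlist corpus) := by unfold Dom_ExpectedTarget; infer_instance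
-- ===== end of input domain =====

-- B replaces A's per-document scan of wlist by an inverted index (token -> set of
-- document indices), a union of the target words' posting sets, and index-wise output.

-- ===== PORT A =====
def ExpectedTarget (wlist : List String) (corpus : List String) : List Int :=
  corpus.foldl (fun Yvalue c =>
    let ctemp := PySem.Str.split₀ c
    let ytemp := ctemp.foldl (fun ys ct =>
      if wlist.contains ct then ys ++ [(1 : Int)] else ys ++ [(0 : Int)]) []
    if ytemp.sum > 0 then Yvalue ++ [(1 : Int)] else Yvalue ++ [(0 : Int)]) []

-- ===== PORT B =====
def ExpectedTarget_alt (wlist : List String) (corpus : List String) : List Int :=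
  let index : PySem.Dict String (PySem.Set Int) :=
    (PySem.List.enumerate corpus 0).foldl (fun d p =>
      (PySem.Str.split₀ p.2).foldl (fun d t =>
        d.modify t [] (fun s => PySem.Set.add s p.1)) d) PySem.Dict.empty
  let hit : PySem.Set Int :=
    wlist.foldl (fun h w => PySem.Set.union h (index.getD w [])) PySem.Set.empty
  (PySem.List.pyRange 0 (corpus.length : Int) 1).map
    (fun i => if PySem.Set.contains hit i then (1 : Int) else 0)

-- ===== PRECONDITION & SPEC =====
def Spec_ExpectedTarget (wlist : List String) (corpus : List String) (out : List Int) : Prop := out = ExpectedTarget_alt wlist corpus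
instance (wlist : List String) (corpus : List String) (out : List Int) : Decidable (Spec_ExpectedTarget wlist corpus out) := by unfold Spec_ExpectedTarget; infer_instance

-- ===== CLAIM (what is proved, stated in full; the proofs are below) =====
def Claim_equal_ExpectedTarget : Prop := ∀ (wlist : List String) (corpus : List String), Dom_ExpectedTarget wlist corpus → Spec_ExpectedTarget wlist corpus (ExpectedTarget wlist corpus)

-- ===== LEMMAS AND PROOFS =====

-- Membership in the posting set produced by the inner (per-document) fold.
theorem inner_fold_mem (ts : List String) (j : Int) (d : PySem.Dict String (PySem.Set Int))
    (t : String) (i : Int) :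
    i ∈ (ts.foldl (fun d t => d.modify t [] (fun s => PySem.Set.add s j)) d).getD t [] ↔
    i ∈ d.getD t [] ∨ (t ∈ ts ∧ i = j) := by
  induction ts generalizing d with
  | nil => simp
  | cons hd tl ih =>
    simp only [List.foldl_cons, ih, PySem.Dict.getD_modify]
    by_cases h : t = hd
    · subst h
      simp [PySem.Set.mem_add]
      tauto
    · simp only [if_neg h, List.mem_cons]
      tauto

-- Membership in a posting set of the full inverted index.
theorem index_mem (corpus : List String) (t : String) (i : Int) :
    i ∈ ((PySem.List.enumerate corpus 0).foldl (fun d p =>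
        (PySem.Str.split₀ p.2).foldl (fun d t =>
          d.modify t [] (fun s => PySem.Set.add s p.1)) d) PySem.Dict.empty).getD t [] ↔
    ∃ k : Nat, ∃ h : k < corpus.length, t ∈ PySem.Str.split₀ corpus[k] ∧ i = (k : Int) := by
  have main : ∀ (ps : List (Int × String)) (d : PySem.Dict String (PySem.Set Int)),
      i ∈ (ps.foldl (fun d p =>
        (PySem.Str.split₀ p.2).foldl (fun d t =>
          d.modify t [] (fun s => PySem.Set.add s p.1)) d) d).getD t [] ↔
      i ∈ d.getD t [] ∨ ∃ p ∈ ps, t ∈ PySem.Str.split₀ p.2 ∧ i = p.1 := by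
    intro ps
    induction ps with
    | nil => simp
    | cons hd tl ih =>
      intro d
      simp only [List.foldl_cons, ih, inner_fold_mem, List.mem_cons]
      constructor
      · rintro ((hm | hm) | ⟨p, hp, hc⟩)
        · exact Or.inl hm
        · exact Or.inr ⟨hd, Or.inl rfl, hm⟩
        · exact Or.inr ⟨p, Or.inr hp, hc⟩
      · rintro (hm | ⟨p, (rfl | hp), hc⟩)
        · exact Or.inl (Or.inl hm)
        · exact Or.inl (Or.inr hc)
        · exact Or.inr ⟨p, hp, hc⟩
  rw [main]
  simp only [PySem.Dict.getD_empty, List.not_mem_nil, false_or,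
    PySem.List.mem_enumerate_iff]
  constructor
  · rintro ⟨p, ⟨k, hk, rfl⟩, h1, h2⟩
    exact ⟨k, hk, by simpa using h1, by simpa using h2⟩
  · rintro ⟨k, hk, h1, h2⟩
    exact ⟨((k : Int), corpus[k]), ⟨k, hk, by simp⟩, h1, h2⟩

-- Membership in the union of the target words' posting sets.
theorem hit_mem (wlist : List String) (index : PySem.Dict String (PySem.Set Int)) (i : Int) :
    i ∈ wlist.foldl (fun h w => PySem.Set.union h (index.getD w [])) PySem.Set.empty ↔
    ∃ w ∈ wlist, i ∈ index.getD w [] := by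
  have main : ∀ (ws : List String) (acc : PySem.Set Int),
      i ∈ ws.foldl (fun h w => PySem.Set.union h (index.getD w [])) acc ↔
      i ∈ acc ∨ ∃ w ∈ ws, i ∈ index.getD w [] := by
    intro ws
    induction ws with
    | nil => simp
    | cons hd tl ih =>
      intro acc
      simp only [List.foldl_cons, ih, PySem.Set.mem_union, List.mem_cons]
      constructor
      · rintro ((hm | hm) | ⟨w, hw, hc⟩)
        · exact Or.inl hm
        · exact Or.inr ⟨hd, Or.inl rfl, hm⟩
        · exact Or.inr ⟨w, Or.inr hw, hc⟩
      · rintro (hm | ⟨w, (rfl | hw), hc⟩)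
        · exact Or.inl (Or.inl hm)
        · exact Or.inl (Or.inr hc)
        · exact Or.inr ⟨w, hw, hc⟩
  rw [main]
  simp [PySem.Set.empty]

-- Per document: A's summed 0/1 flag list is positive iff some token is a target word.
theorem flag_iff (wlist : List String) (c : String) :
    (0 : Int) < ((PySem.Str.split₀ c).foldl (fun ys ct =>
        if wlist.contains ct then ys ++ [(1 : Int)] else ys ++ [(0 : Int)]) []).sum ↔
    ∃ t ∈ PySem.Str.split₀ c, t ∈ wlist := by
  rw [PySem.List.foldl_congr_mem (PySem.Str.split₀ c) _
        (fun ys ct => ys ++ [if wlist.contains ct then (1 : Int) else 0]) []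
        (by intro a x _; by_cases h : x ∈ wlist <;> simp [h]),
      PySem.List.foldl_append_singleton_eq_map, List.nil_append,
      PySem.List.sum_map_ite_one_zero, Int.natCast_pos, List.countP_pos_iff]
  simp

-- A written as a map over the corpus.
theorem A_eq_map (wlist : List String) (corpus : List String) :
    ExpectedTarget wlist corpus =
    corpus.map (fun c => if ∃ t ∈ PySem.Str.split₀ c, t ∈ wlist then (1 : Int) else 0) := by
  unfold ExpectedTarget
  rw [PySem.List.foldl_congr_mem corpus _
      (fun Y c => Y ++ [if ∃ t ∈ PySem.Str.split₀ c, t ∈ wlist then (1 : Int) else 0]) []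
      (by
        intro Y c _
        by_cases h : ∃ t ∈ PySem.Str.split₀ c, t ∈ wlist
        · simp only [if_pos ((flag_iff wlist c).mpr h), if_pos h]
        · simp only [if_neg (fun hp => h ((flag_iff wlist c).mp hp)), if_neg h]),
    PySem.List.foldl_append_singleton_eq_map, List.nil_append]

-- ===== VERDICT (by name: the statement is the Claim_ definition above) =====
theorem ExpectedTarget_spec : Claim_equal_ExpectedTarget := by
  intro wlist corpus _
  show ExpectedTarget wlist corpus = ExpectedTarget_alt wlist corpus
  rw [A_eq_map]
  unfold ExpectedTarget_alt
  simp only [PySem.List.pyRange_zero_nat]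
  apply List.ext_getElem
  · simp
  · intro k h1 h2
    simp only [List.getElem_map, List.getElem_range]
    have hk : k < corpus.length := by simpa using h1
    have : PySem.Set.contains
        (wlist.foldl (fun h w => PySem.Set.union h
          (((PySem.List.enumerate corpus 0).foldl (fun d p =>
            (PySem.Str.split₀ p.2).foldl (fun d t =>
              d.modify t [] (fun s => PySem.Set.add s p.1)) d) PySem.Dict.empty).getD w []))
          PySem.Set.empty) (k : Int) = true ↔
        ∃ t ∈ PySem.Str.split₀ corpus[k], t ∈ wlist := by
      rw [PySem.Set.contains_iff, hit_mem]
      constructor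
      · rintro ⟨w, hw, hmem⟩
        rw [index_mem] at hmem
        obtain ⟨k', hk', ht, hik⟩ := hmem
        have : k' = k := by exact_mod_cast hik.symm
        subst this
        exact ⟨w, ht, hw⟩
      · rintro ⟨t, ht, htw⟩
        exact ⟨t, htw, (index_mem corpus t (k : Int)).mpr ⟨k, hk, ht, rfl⟩⟩
    by_cases h : ∃ t ∈ PySem.Str.split₀ corpus[k], t ∈ wlist
    · rw [if_pos h, if_pos (this.mpr h)]
    · rw [if_neg h, if_neg (fun hc => h (this.mp hc))]
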